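-- pv_equiv track=rewrite | github.com/ehyeok9/Algorithm | 260220/사다리 타기/ladder-game.py | dfs
-- ===== SOURCE A (Python) =====
-- def dfs(node, depth, graph, maxDepth):
--     if (depth > maxDepth):
--         return node
--
--     # 가로줄의 선이 있는 경우
--     if (depth in graph):
--
--         # 가로줄이 겹쳐 주어지는 경우는 없기에 좌/우만 검사
--         # 오른쪽 가로줄이 있다 (node가 N일 때 어차피 N + 1에 대한 가로줄은 입력으로 안 주어지기에 if문 조건 패스)
--         if (node in graph[depth]):
--             return dfs(node + 1, depth + 1, graph, maxDepth)
--         # 왼쪽 가로줄이 있다 (node가 1일 때 어차피 0에 대한 가로줄은 입력으로 안 주어지기에 if문 조건 패스)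
--         elif ((node - 1) in graph[depth]):
--             return dfs(node - 1, depth + 1, graph, maxDepth)
--         # 둘 다 없다
--         else:
--             return dfs(node, depth + 1, graph, maxDepth)
--     else:
--         # 가로줄 선이 없으면 바로 내려간다
--         return dfs(node, depth + 1, graph, maxDepth)
-- ===== SOURCE B (Python) =====
-- def dfs(node, depth, graph, maxDepth):
--     # Trace the ladder by visiting only the levels that actually have rungs,
--     # in increasing order; levels without an entry cannot move the node.
--     for d in sorted(graph):
--         if depth <= d <= maxDepth:
--             row = graph[d]
--             if node in row:
--                 node += 1
--             elif node - 1 in row: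
--                 node -= 1
--     return node
-- ===== Notes on version B (the rewrite author's own statement) =====
-- stated objective: alternative
-- what changed: B replaces A's level-by-level recursion over every depth by a single pass over the graph's sorted rung levels (levels without rungs cannot move the node); Pre_ excludes runs of more than 9000 levels, on which A's recursion overflows the interpreter's recursion limit and raises RecursionError (the margin below the 10000-frame limit accounts for the caller's existing stack frames, so a thin band where A may still return is excluded too).
-- outside the precondition, e.g. on dfs(1, 0, {}, 9500): A returns 1, B returns 1; on dfs(1, 0, {}, 20000): A raises RecursionError, B returns 1
import Mathlib
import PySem

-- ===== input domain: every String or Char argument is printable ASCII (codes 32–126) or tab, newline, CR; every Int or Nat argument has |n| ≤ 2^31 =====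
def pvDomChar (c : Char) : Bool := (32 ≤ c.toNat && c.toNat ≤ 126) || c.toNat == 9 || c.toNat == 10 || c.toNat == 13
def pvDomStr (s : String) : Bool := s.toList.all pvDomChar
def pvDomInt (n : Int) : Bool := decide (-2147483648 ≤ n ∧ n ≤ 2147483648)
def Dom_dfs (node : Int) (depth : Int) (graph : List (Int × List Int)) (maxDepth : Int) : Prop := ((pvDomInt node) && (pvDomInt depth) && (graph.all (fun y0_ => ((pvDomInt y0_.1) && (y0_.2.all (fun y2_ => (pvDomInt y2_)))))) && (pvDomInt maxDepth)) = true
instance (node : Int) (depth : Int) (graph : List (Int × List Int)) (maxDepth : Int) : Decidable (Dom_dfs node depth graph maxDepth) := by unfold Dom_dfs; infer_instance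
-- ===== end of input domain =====

-- B traces the ladder by one pass over the SORTED rung levels only (levels without rungs cannot
-- move the node), instead of A's level-by-level recursion; equivalence proved on Pre_ below.

-- ===== PORT A =====
-- literal port of A: four-way tail recursion on (node, depth); totalized with a fuel argument
-- that counts the remaining levels, so fuel 0 only occurs when depth > maxDepth (A's base case)
def dfsGo (graph : List (Int × List Int)) (maxDepth : Int) : Nat → Int → Int → Int
  | 0, _, node => node
  | Nat.succ f, depth, node =>
    if depth > maxDepth then node
    else
      if (PySem.Dict.mk graph).contains depth then
        let row := ((PySem.Dict.mk graph).get? depth).getD []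
        if row.contains node then dfsGo graph maxDepth f (depth + 1) (node + 1)
        else if row.contains (node - 1) then dfsGo graph maxDepth f (depth + 1) (node - 1)
        else dfsGo graph maxDepth f (depth + 1) node
      else dfsGo graph maxDepth f (depth + 1) node

def dfs (node : Int) (depth : Int) (graph : List (Int × List Int)) (maxDepth : Int) : Int :=
  dfsGo graph maxDepth (maxDepth + 1 - depth).toNat depth node

-- ===== PORT B =====
-- one iteration of B's for-loop body at rung level d (row = graph[d])
def dfsStep (graph : List (Int × List Int)) (node : Int) (d : Int) : Int :=
  let row := ((PySem.Dict.mk graph).get? d).getD []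
  if row.contains node then node + 1
  else if row.contains (node - 1) then node - 1
  else node

-- port of B: 'for d in sorted(graph): if depth <= d <= maxDepth: …'
-- (iterating a Python dict visits each DISTINCT key once, hence dedup of the assoc list's keys)
def dfs_alt (node : Int) (depth : Int) (graph : List (Int × List Int)) (maxDepth : Int) : Int :=
  (PySem.List.sorted (PySem.List.dedup ((PySem.Dict.mk graph).keys)) (fun x => x) false).foldl
    (fun n d => if depth ≤ d ∧ d ≤ maxDepth then dfsStep graph n d else n) node

-- ===== PRECONDITION & SPEC =====
-- Pre_ excludes runs of more than 9000 levels: there A's per-level recursion overflows the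
-- interpreter's recursion limit (10000 frames) and raises RecursionError; the margin below
-- 10000 accounts for the caller's own stack frames, so a thin band where A may still return
-- is excluded too.
def Pre_dfs (_node : Int) (depth : Int) (_graph : List (Int × List Int)) (maxDepth : Int) : Prop :=
  depth > maxDepth ∨ maxDepth - depth ≤ 9000
instance (node : Int) (depth : Int) (graph : List (Int × List Int)) (maxDepth : Int) : Decidable (Pre_dfs node depth graph maxDepth) := by unfold Pre_dfs; infer_instance
def pvWitness_dfs : Int × Int × (List (Int × List Int)) × Int := (1, 0, [(0, [1]), (2, [2])], 3)

def Spec_dfs (node : Int) (depth : Int) (graph : List (Int × List Int)) (maxDepth : Int) (out : Int) : Prop := out = dfs_alt node depth graph maxDepth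
instance (node : Int) (depth : Int) (graph : List (Int × List Int)) (maxDepth : Int) (out : Int) : Decidable (Spec_dfs node depth graph maxDepth out) := by unfold Spec_dfs; infer_instance

-- ===== CLAIM (what is proved, stated in full; the proofs are below) =====
def Claim_equal_dfs : Prop := ∀ (node : Int) (depth : Int) (graph : List (Int × List Int)) (maxDepth : Int), Dom_dfs node depth graph maxDepth → Pre_dfs node depth graph maxDepth → Spec_dfs node depth graph maxDepth (dfs node depth graph maxDepth)
-- ===== LEMMAS AND PROOFS =====

-- if depth is absent from S, widening the lower bound from depth+1 to depth changes nothing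
theorem filter_skip (S : List Int) (depth maxDepth : Int) (h : depth ∉ S) :
    S.filter (fun d => decide (depth ≤ d ∧ d ≤ maxDepth))
      = S.filter (fun d => decide (depth + 1 ≤ d ∧ d ≤ maxDepth)) := by
  apply List.filter_congr
  intro d hd
  have : d ≠ depth := fun e => h (e ▸ hd)
  simp only [decide_eq_decide]
  omega

-- on a ≤-sorted duplicate-free list containing depth ≤ maxDepth, the window filter peels depth off the front
theorem filter_cons (depth maxDepth : Int) (hdm : depth ≤ maxDepth) :
    ∀ (S : List Int), S.Pairwise (· ≤ ·) → S.Nodup → depth ∈ S →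
    S.filter (fun d => decide (depth ≤ d ∧ d ≤ maxDepth))
      = depth :: S.filter (fun d => decide (depth + 1 ≤ d ∧ d ≤ maxDepth)) := by
  intro S
  induction S with
  | nil => intro _ _ h; cases h
  | cons a t ih =>
    intro hp hn hmem
    have hpt := (List.pairwise_cons.mp hp).2
    have hpa := (List.pairwise_cons.mp hp).1
    have hnt := (List.nodup_cons.mp hn).2
    have hna := (List.nodup_cons.mp hn).1
    rcases eq_or_ne a depth with rfl | hne
    · -- head is depth: keep it; in the tail every element exceeds depth
      have htail : t.filter (fun d => decide (a ≤ d ∧ d ≤ maxDepth))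
          = t.filter (fun d => decide (a + 1 ≤ d ∧ d ≤ maxDepth)) :=
        filter_skip t a maxDepth hna
      simp only [List.filter_cons, decide_eq_true_eq]
      rw [if_pos (⟨le_refl a, hdm⟩ : a ≤ a ∧ a ≤ maxDepth),
        if_neg (by omega : ¬(a + 1 ≤ a ∧ a ≤ maxDepth)), htail]
    · -- head is not depth: depth is in the tail, and a ≤ depth, so a < depth: drop a on both sides
      have hmt : depth ∈ t := by
        rcases List.mem_cons.mp hmem with h | h
        · exact absurd h.symm hne
        · exact h
      have hale : a ≤ depth := hpa depth hmt
      have h1 : decide (depth ≤ a ∧ a ≤ maxDepth) = false := by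
        simp only [decide_eq_false_iff_not]; omega
      have h2 : decide (depth + 1 ≤ a ∧ a ≤ maxDepth) = false := by
        simp only [decide_eq_false_iff_not]; omega
      simp only [List.filter_cons, h1, h2]
      exact ih hpt hnt hmt

-- folding B's guarded step over the whole sorted key list = folding the raw step over the window filter
theorem foldl_guard_eq_filter (graph : List (Int × List Int)) (depth maxDepth : Int) :
    ∀ (S : List Int) (node : Int),
    S.foldl (fun n d => if depth ≤ d ∧ d ≤ maxDepth then dfsStep graph n d else n) node
      = (S.filter (fun d => decide (depth ≤ d ∧ d ≤ maxDepth))).foldl (dfsStep graph) node := by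
  intro S
  induction S with
  | nil => intro node; rfl
  | cons a t ih =>
    intro node
    simp only [List.foldl_cons, List.filter_cons]
    by_cases h : depth ≤ a ∧ a ≤ maxDepth
    · simp only [h]; exact ih _
    · simp only [h, if_false]; exact ih _

-- the core invariant: A's recursion from (node, depth) equals folding the step over any
-- ≤-sorted duplicate-free enumeration S of the graph's keys, restricted to [depth, maxDepth]
theorem dfs_eq_filter_fold (graph : List (Int × List Int)) (maxDepth : Int) (S : List Int)
    (hpair : S.Pairwise (· ≤ ·)) (hnod : S.Nodup)
    (hmemS : ∀ d : Int, d ∈ S ↔ (PySem.Dict.mk graph).contains d = true) :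
    ∀ (k : Nat) (node depth : Int), (maxDepth + 1 - depth).toNat ≤ k →
    dfsGo graph maxDepth k depth node
      = (S.filter (fun d => decide (depth ≤ d ∧ d ≤ maxDepth))).foldl (dfsStep graph) node := by
  intro k
  induction k with
  | zero =>
    intro node depth hk
    have hgt : depth > maxDepth := by omega
    have hfil : S.filter (fun d => decide (depth ≤ d ∧ d ≤ maxDepth)) = [] := by
      apply List.filter_eq_nil_iff.mpr
      intro d _
      simp only [decide_eq_true_eq]; omega
    rw [hfil]; rfl
  | succ k ih =>
    intro node depth hk
    by_cases hgt : depth > maxDepth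
    · have hfil : S.filter (fun d => decide (depth ≤ d ∧ d ≤ maxDepth)) = [] := by
        apply List.filter_eq_nil_iff.mpr
        intro d _
        simp only [decide_eq_true_eq]; omega
      rw [hfil, dfsGo, if_pos hgt]; rfl
    · have hle : depth ≤ maxDepth := not_lt.mp hgt
      have hk' : (maxDepth + 1 - (depth + 1)).toNat ≤ k := by omega
      rw [dfsGo, if_neg hgt]
      by_cases hc : (PySem.Dict.mk graph).contains depth = true
      · have hmem : depth ∈ S := (hmemS depth).mpr hc
        have hfil := filter_cons depth maxDepth hle S hpair hnod hmem
        rw [hfil]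
        simp only [List.foldl_cons, hc, if_true]
        by_cases h1 : (((PySem.Dict.mk graph).get? depth).getD []).contains node = true
        · have hm1 : node ∈ ((PySem.Dict.mk graph).get? depth).getD [] := by simpa using h1
          simp only [h1, if_true]
          have hv : dfsStep graph node depth = node + 1 := by
            simp [dfsStep, hm1]
          rw [ih (node + 1) (depth + 1) hk', hv]
        · have hm1 : node ∉ ((PySem.Dict.mk graph).get? depth).getD [] := by simpa using h1
          simp only [h1, Bool.false_eq_true, if_false]
          by_cases h2 : (((PySem.Dict.mk graph).get? depth).getD []).contains (node - 1) = true
          · have hm2 : node - 1 ∈ ((PySem.Dict.mk graph).get? depth).getD [] := by simpa using h2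
            simp only [h2, if_true]
            have hv : dfsStep graph node depth = node - 1 := by
              simp [dfsStep, hm1, hm2]
            rw [ih (node - 1) (depth + 1) hk', hv]
          · have hm2 : node - 1 ∉ ((PySem.Dict.mk graph).get? depth).getD [] := by simpa using h2
            simp only [h2, Bool.false_eq_true, if_false]
            have hv : dfsStep graph node depth = node := by
              simp [dfsStep, hm1, hm2]
            rw [ih node (depth + 1) hk', hv]
      · have hnm : depth ∉ S := fun h => hc ((hmemS depth).mp h)
        rw [filter_skip S depth maxDepth hnm]
        simp only [Bool.not_eq_true] at hc
        simp only [hc, Bool.false_eq_true, if_false]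
        exact ih node (depth + 1) hk'

-- ===== VERDICT =====
theorem dfs_spec : Claim_equal_dfs := by
  intro node depth graph maxDepth _ _
  unfold Spec_dfs dfs_alt
  rw [foldl_guard_eq_filter]
  unfold dfs
  apply dfs_eq_filter_fold graph maxDepth _ _ _ _ _ node depth le_rfl
  · simpa using PySem.List.sorted_pairwise (PySem.List.dedup ((PySem.Dict.mk graph).keys)) (fun x : Int => x)
  · exact ((PySem.List.sorted_perm _ _ _).nodup_iff).mpr (PySem.List.nodup_dedup _)
  · intro d
    rw [PySem.List.mem_sorted, PySem.List.mem_dedup, ← PySem.Dict.contains_iff_mem_keys]
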